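-- pv_equiv track=rewrite | github.com/ab649964207/SMT_Generation-strategy | domain/utils/refiner.py | generate_dnf_model
-- ===== SOURCE A (Python) =====
-- def generate_dnf_model(model_arr):
--     def dfs(idx, tmp_list):
--         if idx >= len(or_clause):
--             this_is_a_list.append(list(tmp_list))
--             return
--         for expr in or_clause[idx]:
--             tmp_list.append(expr)
--             dfs(idx + 1, tmp_list)
--             tmp_list.pop()
--
--     res = []
--     for or_clause in model_arr:
--         this_is_a_list = []
--         dfs(0, [])
--         res.extend(this_is_a_list)
--     return res
-- ===== SOURCE B (Python) =====
-- def generate_dnf_model(model_arr):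
--     res = []
--     for or_clause in model_arr:
--         acc = [[]]
--         for sub_list in or_clause:
--             acc = [prev + [e] for prev in acc for e in sub_list]
--         res.extend(acc)
--     return res
-- ===== Notes on version B (the rewrite author's own statement) =====
-- stated objective: simpler
-- what changed: Replaced the nested recursive DFS with shared mutable tmp_list/pop backtracking by a flat iterative product fold: per clause, each sub-list extends every partial combination of the accumulator.
import Mathlib
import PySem

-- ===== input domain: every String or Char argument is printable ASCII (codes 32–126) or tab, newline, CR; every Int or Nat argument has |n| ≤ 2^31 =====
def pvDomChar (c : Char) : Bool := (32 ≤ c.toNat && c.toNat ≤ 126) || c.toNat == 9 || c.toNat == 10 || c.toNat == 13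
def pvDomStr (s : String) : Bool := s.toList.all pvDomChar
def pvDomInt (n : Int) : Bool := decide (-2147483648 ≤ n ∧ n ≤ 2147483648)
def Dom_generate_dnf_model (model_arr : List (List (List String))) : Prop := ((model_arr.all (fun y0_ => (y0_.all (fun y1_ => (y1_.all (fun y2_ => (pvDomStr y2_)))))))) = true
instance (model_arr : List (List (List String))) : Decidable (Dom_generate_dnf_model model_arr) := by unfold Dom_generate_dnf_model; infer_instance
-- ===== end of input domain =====

-- B replaces A's recursive DFS with backtracking by an iterative per-clause product fold; objective: simpler.


-- ===== PORT A =====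
-- dfs(idx, tmp_list): recursion over the remaining sub-lists of or_clause; the Python's
-- append/dfs/pop over a shared tmp_list is ported as passing tmp ++ [expr]; this_is_a_list
-- accumulation becomes the foldl's acc ++ … in the same visit order.
def pvDfsA : List (List String) → List String → List (List String)
  | [], tmp => [tmp]
  | sub :: rest, tmp =>
      sub.foldl (fun acc expr => acc ++ pvDfsA rest (tmp ++ [expr])) []

def generate_dnf_model (model_arr : List (List (List String))) : List (List String) :=
  model_arr.foldl (fun res or_clause => res ++ pvDfsA or_clause []) []

-- ===== PORT B =====
-- per-clause fold: acc = [[]]; each sub_list maps every partial combination to its extensions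
def pvClauseB (or_clause : List (List String)) : List (List String) :=
  or_clause.foldl (fun acc sub_list => acc.flatMap (fun prev => sub_list.map (fun e => prev ++ [e]))) [[]]

def generate_dnf_model_alt (model_arr : List (List (List String))) : List (List String) :=
  model_arr.foldl (fun res or_clause => res ++ pvClauseB or_clause) []

-- ===== PRECONDITION & SPEC =====
def Spec_generate_dnf_model (model_arr : List (List (List String))) (out : List (List String)) : Prop := out = generate_dnf_model_alt model_arr
instance (model_arr : List (List (List String))) (out : List (List String)) : Decidable (Spec_generate_dnf_model model_arr out) := by unfold Spec_generate_dnf_model; infer_instance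

-- ===== CLAIM (what is proved, stated in full; the proofs are below) =====
def Claim_equal_generate_dnf_model : Prop := ∀ (model_arr : List (List (List String))), Dom_generate_dnf_model model_arr → Spec_generate_dnf_model model_arr (generate_dnf_model model_arr)

-- ===== LEMMAS AND PROOFS =====

-- A's inner loop over sub is the flatMap of the recursive calls
lemma pvDfsA_cons (sub : List String) (rest : List (List String)) (tmp : List String) :
    pvDfsA (sub :: rest) tmp = sub.flatMap (fun expr => pvDfsA rest (tmp ++ [expr])) := by
  simp [pvDfsA, PySem.List.foldl_append_eq_flatMap, List.flatMap]

-- B's fold from an arbitrary accumulator distributes over the partial combinations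
lemma pvFoldB_flatMap (rest : List (List String)) (xs : List (List String)) :
    rest.foldl (fun acc sub_list => acc.flatMap (fun prev => sub_list.map (fun e => prev ++ [e]))) xs
      = xs.flatMap (fun p => pvDfsA rest p) := by
  induction rest generalizing xs with
  | nil => simp [pvDfsA]
  | cons sub rest ih =>
      simp only [List.foldl_cons, ih, List.flatMap_assoc, pvDfsA_cons]
      congr 1
      funext p
      simp [List.flatMap_map]

lemma pvClauseB_eq (or_clause : List (List String)) : pvClauseB or_clause = pvDfsA or_clause [] := by
  simp [pvClauseB, pvFoldB_flatMap]

lemma pvOuter (model_arr : List (List (List String))) (res : List (List String)) :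
    model_arr.foldl (fun res or_clause => res ++ pvDfsA or_clause []) res
      = model_arr.foldl (fun res or_clause => res ++ pvClauseB or_clause) res := by
  induction model_arr generalizing res with
  | nil => rfl
  | cons oc rest ih => simp [List.foldl_cons, ih, pvClauseB_eq]

-- ===== VERDICT (by name: the statement is the Claim_ definition above) =====
theorem generate_dnf_model_spec : Claim_equal_generate_dnf_model := by
  intro model_arr _
  unfold Spec_generate_dnf_model generate_dnf_model generate_dnf_model_alt
  exact pvOuter model_arr []
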